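-- pv_equiv track=rewrite | github.com/Dragoniru/Portifolio | QuickRouteApp/views.py | find_next_move
-- ===== SOURCE A (Python) =====
-- def find_next_move(current_pos, visited, json_data):
--     next_moves = json_data.get(current_pos, {})
--     quickest_move = float('inf')
--     quickest_move_pos = None
--
--     for pos, mov_time in next_moves.items():
--         if pos not in visited and mov_time < quickest_move:
--             quickest_move = mov_time
--             quickest_move_pos = pos
--
--     return quickest_move_pos
-- ===== SOURCE B (Python) =====
-- def find_next_move(current_pos, visited, json_data):
--     # Stable sort by move time alone, then take the first unvisited position.
--     ordered = sorted(json_data.get(current_pos, {}).items(), key=lambda kv: kv[1])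
--     for pos, _mov_time in ordered:
--         if pos not in visited:
--             return pos
--     return None
-- ===== Notes on version B (the rewrite author's own statement) =====
-- stated objective: alternative
-- what changed: Replaces the running-minimum loop with a stable sort of the neighbor items by move time followed by a scan returning the first unvisited position (stability reproduces A's first-wins tie-breaking).
import Mathlib
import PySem

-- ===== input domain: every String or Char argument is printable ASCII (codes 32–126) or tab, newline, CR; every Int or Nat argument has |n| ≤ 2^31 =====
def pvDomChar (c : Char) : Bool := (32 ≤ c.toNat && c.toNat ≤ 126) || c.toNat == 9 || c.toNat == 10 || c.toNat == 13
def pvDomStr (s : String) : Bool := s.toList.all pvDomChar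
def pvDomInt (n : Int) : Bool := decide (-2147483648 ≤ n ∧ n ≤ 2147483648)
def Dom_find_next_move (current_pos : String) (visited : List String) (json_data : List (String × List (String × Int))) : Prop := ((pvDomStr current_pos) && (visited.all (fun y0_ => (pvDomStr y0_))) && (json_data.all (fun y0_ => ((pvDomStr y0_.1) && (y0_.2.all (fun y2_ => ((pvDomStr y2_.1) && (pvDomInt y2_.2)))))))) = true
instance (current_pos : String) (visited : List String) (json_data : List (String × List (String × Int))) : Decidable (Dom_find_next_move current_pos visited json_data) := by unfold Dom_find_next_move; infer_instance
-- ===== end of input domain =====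

-- B replaces A's running-minimum loop by a stable sort of the neighbor items by move time
-- followed by taking the first unvisited position (alternative decomposition, same behaviour).


-- ===== PORT A =====
-- loop body of A's for-loop: state = (quickest_move : Option Int ~ float('inf') as none, quickest_move_pos)
def pvStepA (visited : List String) (st : Option Int × Option String) (pm : String × Int) :
    Option Int × Option String :=
  if (!visited.contains pm.1 &&
      (match st.1 with
       | none => true              -- mov_time < inf
       | some q => decide (pm.2 < q))) = true
  then (some pm.2, some pm.1) else st

def find_next_move (current_pos : String) (visited : List String)
    (json_data : List (String × List (String × Int))) : Option String :=
  let next_moves := PySem.Dict.getD (PySem.Dict.mk json_data) current_pos []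
  (next_moves.foldl (pvStepA visited) (none, none)).2

-- ===== PORT B =====
def find_next_move_alt (current_pos : String) (visited : List String)
    (json_data : List (String × List (String × Int))) : Option String :=
  let ordered := PySem.List.sorted (PySem.Dict.getD (PySem.Dict.mk json_data) current_pos [])
    (fun kv => kv.2) false
  match ordered.find? (fun kv => !visited.contains kv.1) with
  | some kv => some kv.1
  | none => none

-- ===== PRECONDITION & SPEC =====
def Spec_find_next_move (current_pos : String) (visited : List String) (json_data : List (String × List (String × Int))) (out : Option String) : Prop := out = find_next_move_alt current_pos visited json_data
instance (current_pos : String) (visited : List String) (json_data : List (String × List (String × Int))) (out : Option String) : Decidable (Spec_find_next_move current_pos visited json_data out) := by unfold Spec_find_next_move; infer_instance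

-- ===== CLAIM (what is proved, stated in full; the proofs are below) =====
def Claim_equal_find_next_move : Prop := ∀ (current_pos : String) (visited : List String) (json_data : List (String × List (String × Int))), Dom_find_next_move current_pos visited json_data → Spec_find_next_move current_pos visited json_data (find_next_move current_pos visited json_data)

-- ===== LEMMAS AND PROOFS =====

-- inserting an element the scan ignores does not change the first hit
lemma find?_insertBy_of_neg {α : Type} (p : α → Bool) (before : α → α → Bool) (x : α)
    (s : List α) (hx : p x = false) :
    (PySem.List.insertBy before x s).find? p = s.find? p := by
  induction s with
  | nil => simp [PySem.List.insertBy, List.find?, hx]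
  | cons y ys ih =>
    simp only [PySem.List.insertBy]
    by_cases h : before x y = true
    · simp [h, List.find?, hx]
    · simp only [if_neg h, List.find?]
      cases hy : p y <;> simp [ih]

-- inserting a matching element x into a list sorted by time: the first hit becomes the
-- smaller-timed of x and the previous first hit (x wins only strictly: stability)
lemma find?_insertBy_of_pos (visited : List String) (x : String × Int) (s : List (String × Int))
    (hx : x.1 ∉ visited)
    (hs : s.Pairwise (fun a b => a.2 ≤ b.2)) :
    (PySem.List.insertBy (fun a b => decide (a.2 < b.2)) x s).find?
        (fun kv => !visited.contains kv.1) =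
      match s.find? (fun kv => !visited.contains kv.1) with
      | none => some x
      | some kv => if x.2 < kv.2 then some x else some kv := by
  induction s with
  | nil => simp [PySem.List.insertBy, List.find?, hx]
  | cons y ys ih =>
    rcases List.pairwise_cons.mp hs with ⟨hy_le, hys⟩
    by_cases h : x.2 < y.2
    · rw [show PySem.List.insertBy (fun a b : String × Int => decide (a.2 < b.2)) x (y :: ys)
          = x :: y :: ys from by simp [PySem.List.insertBy, h]]
      by_cases hy : y.1 ∈ visited
      · cases hkv : ys.find? (fun kv => !decide (kv.1 ∈ visited)) with
        | none => simp [hx, hy, hkv]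
        | some kv =>
          have hlt : x.2 < kv.2 :=
            lt_of_lt_of_le h (hy_le kv (List.mem_of_find?_eq_some hkv))
          simp [hx, hy, hkv, hlt]
      · simp [hx, hy, h]
    · rw [show PySem.List.insertBy (fun a b : String × Int => decide (a.2 < b.2)) x (y :: ys)
          = y :: PySem.List.insertBy (fun a b => decide (a.2 < b.2)) x ys from by
            simp [PySem.List.insertBy, h]]
      by_cases hy : y.1 ∈ visited
      · simpa [List.find?_cons, hy] using ih hys
      · simp [hy, h]

-- A\'s loop over any list computes exactly "first unvisited of the stable sort by time"
lemma foldA_eq_sorted_find (visited : List String) (l : List (String × Int)) :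
    l.foldl (pvStepA visited) (none, none) =
      match (PySem.List.sorted l (fun kv => kv.2) false).find?
          (fun kv => !visited.contains kv.1) with
      | none => ((none : Option Int), (none : Option String))
      | some kv => (some kv.2, some kv.1) := by
  induction l using List.reverseRecOn with
  | nil => rfl
  | append_singleton xs x ih =>
    have hsorted : PySem.List.sorted (xs ++ [x]) (fun kv : String × Int => kv.2) false
        = PySem.List.insertBy (fun a b : String × Int => decide (a.2 < b.2)) x
            (PySem.List.sorted xs (fun kv => kv.2) false) := by
      rw [PySem.List.sorted_eq_foldl_insertBy, List.foldl_append,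
        ← PySem.List.sorted_eq_foldl_insertBy]
      rfl
    rw [List.foldl_append, List.foldl_cons, List.foldl_nil, ih, hsorted]
    by_cases hx : x.1 ∈ visited
    · rw [find?_insertBy_of_neg _ _ _ _ (by simp [hx])]
      cases hkv : (PySem.List.sorted xs (fun kv : String × Int => kv.2) false).find?
          (fun kv => !visited.contains kv.1) with
      | none => simp [pvStepA, hx]
      | some kv => simp [pvStepA, hx]
    · rw [find?_insertBy_of_pos visited x _ hx
        (PySem.List.sorted_pairwise xs (fun kv => kv.2))]
      cases hkv : (PySem.List.sorted xs (fun kv : String × Int => kv.2) false).find?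
          (fun kv => !visited.contains kv.1) with
      | none => simp [pvStepA, hx]
      | some kv =>
        by_cases hlt : x.2 < kv.2
        · simp [pvStepA, hx, hlt]
        · simp [pvStepA, hx, hlt]

-- ===== VERDICT (by name: the statement is the Claim_ definition above) =====
theorem find_next_move_spec : Claim_equal_find_next_move := by
  intro current_pos visited json_data _
  unfold Spec_find_next_move
  simp only [find_next_move, find_next_move_alt]
  rw [foldA_eq_sorted_find]
  cases (PySem.List.sorted (PySem.Dict.getD (PySem.Dict.mk json_data) current_pos [])
      (fun kv : String × Int => kv.2) false).find? (fun kv => !visited.contains kv.1) <;> rfl
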